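-- pv_equiv track=rewrite | github.com/epn-vespa/FacilityList | src/acronymous.py | _del_numbers
-- ===== SOURCE A (Python) =====
-- def _del_numbers(acronym: str) -> str:
--     """
--     Get a version of the acronym with multiplied letters (ex: DA2I => DAII)
--     """
--     number = 0
--     res = ""
--     for letter in acronym:
--         if letter.isnumeric():
--             number = number * 10 + int(letter)
--         elif letter.isalpha():
--             if number > 0 and number < 10:
--                 res += letter * number
--             elif number >= 10:
--                 res += str(number) + letter
--             else:
--                 res += letter
--             number = 0
--         else:
--             number = 0
--             res += letter
--     if number > 0:
--         res += str(number)
--     return res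
-- ===== SOURCE B (Python) =====
-- def _del_numbers(acronym: str) -> str:
--     """
--     Get a version of the acronym with multiplied letters (ex: DA2I => DAII)
--     Two-phase: tokenize digit-runs into integer tokens, then render.
--     """
--     # phase 1: tokens = ints (merged digit runs) and single chars
--     tokens = []
--     num = None
--     for ch in acronym:
--         if ch.isnumeric():
--             num = (0 if num is None else num) * 10 + int(ch)
--         else:
--             if num is not None:
--                 tokens.append(num)
--                 num = None
--             tokens.append(ch)
--     if num is not None:
--         tokens.append(num)
--     # phase 2: render tokens with a pending multiplier
--     out = []
--     pending = 0
--     for t in tokens: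
--         if isinstance(t, int):
--             pending = t
--         elif t.isalpha():
--             if 0 < pending < 10:
--                 out.append(t * pending)
--             elif pending >= 10:
--                 out.append(str(pending) + t)
--             else:
--                 out.append(t)
--             pending = 0
--         else:
--             pending = 0
--             out.append(t)
--     if pending > 0:
--         out.append(str(pending))
--     return ''.join(out)
-- ===== Notes on version B (the rewrite author's own statement) =====
-- stated objective: alternative
-- what changed: Replaces A's single fused state-machine scan with a two-phase pipeline: a tokenizer merging digit runs into integer tokens, then a renderer walking the token list with a pending multiplier.
import Mathlib
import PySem

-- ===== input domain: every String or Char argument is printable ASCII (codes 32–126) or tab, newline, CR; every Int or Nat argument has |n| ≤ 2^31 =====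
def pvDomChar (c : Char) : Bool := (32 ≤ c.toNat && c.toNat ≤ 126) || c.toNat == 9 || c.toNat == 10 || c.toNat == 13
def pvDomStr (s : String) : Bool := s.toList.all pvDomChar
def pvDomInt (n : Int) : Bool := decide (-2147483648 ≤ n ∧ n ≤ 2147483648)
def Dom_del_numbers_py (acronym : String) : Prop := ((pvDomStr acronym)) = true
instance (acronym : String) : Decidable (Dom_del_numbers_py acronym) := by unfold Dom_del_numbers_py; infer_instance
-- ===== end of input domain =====

-- B replaces A's fused one-pass state machine by a tokenize-then-render pipeline; same O(n) cost, different decomposition.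


-- ===== PORT A =====
-- A's fused loop: state (number, res).  On the printable-ASCII domain letter.isnumeric()
-- is PySem.Chars.isdigit and int(letter) is exactly c.toNat - 48 (the digit value).
def delNumsALoop : List Char → Int → List Char → List Char
  | [], number, res => if number > 0 then res ++ PySem.Int.toChars number else res
  | c :: rest, number, res =>
    if PySem.Chars.isdigit c then
      delNumsALoop rest (number * 10 + ((c.toNat : Int) - 48)) res
    else if PySem.Chars.isalpha c then
      delNumsALoop rest 0
        (if number > 0 ∧ number < 10 then res ++ List.replicate number.toNat c
         else if number ≥ 10 then res ++ PySem.Int.toChars number ++ [c]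
         else res ++ [c])
    else
      delNumsALoop rest 0 (res ++ [c])

def del_numbers_py (acronym : String) : String :=
  String.mk (delNumsALoop acronym.toList 0 [])

-- ===== PORT B =====
-- B phase 1: tokens are merged digit-run integers or single characters.
inductive PvTok where
  | num (n : Int)
  | ch (c : Char)
deriving DecidableEq, Repr

def delNumsTok : List Char → Option Int → List PvTok
  | [], none => []
  | [], some n => [PvTok.num n]
  | c :: rest, st =>
    if PySem.Chars.isdigit c then
      delNumsTok rest (some ((st.getD 0) * 10 + ((c.toNat : Int) - 48)))
    else
      match st with
      | some n => PvTok.num n :: PvTok.ch c :: delNumsTok rest none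
      | none => PvTok.ch c :: delNumsTok rest none

-- B phase 2: render the token list with a pending multiplier.
def delNumsRender : List PvTok → Int → List Char → List Char
  | [], pending, out => if pending > 0 then out ++ PySem.Int.toChars pending else out
  | PvTok.num n :: rest, _, out => delNumsRender rest n out
  | PvTok.ch c :: rest, pending, out =>
    if PySem.Chars.isalpha c then
      delNumsRender rest 0
        (if 0 < pending ∧ pending < 10 then out ++ List.replicate pending.toNat c
         else if pending ≥ 10 then out ++ PySem.Int.toChars pending ++ [c]
         else out ++ [c])
    else
      delNumsRender rest 0 (out ++ [c])

def del_numbers_py_alt (acronym : String) : String :=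
  String.mk (delNumsRender (delNumsTok acronym.toList none) 0 [])

-- ===== PRECONDITION & SPEC =====
def Spec_del_numbers_py (acronym : String) (out : String) : Prop := out = del_numbers_py_alt acronym
instance (acronym : String) (out : String) : Decidable (Spec_del_numbers_py acronym out) := by unfold Spec_del_numbers_py; infer_instance

-- ===== CLAIM (what is proved, stated in full; the proofs are below) =====
def Claim_equal_del_numbers_py : Prop := ∀ (acronym : String), Dom_del_numbers_py acronym → Spec_del_numbers_py acronym (del_numbers_py acronym)

-- ===== LEMMAS AND PROOFS =====
-- Invariant linking the two phases of B to A's fused loop: a pending tokenizer state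
-- `some n` behaves like A's counter n (the render pending is overwritten by the num token),
-- and the empty state with pending 0 behaves like A's counter 0.
theorem delNums_key (cs : List Char) :
    (∀ (n p : Int) (out : List Char),
        delNumsRender (delNumsTok cs (some n)) p out = delNumsALoop cs n out) ∧
    (∀ out : List Char,
        delNumsRender (delNumsTok cs none) 0 out = delNumsALoop cs 0 out) := by
  induction cs with
  | nil =>
    constructor <;> intros <;> simp [delNumsTok, delNumsRender, delNumsALoop]
  | cons c rest ih =>
    by_cases hd : PySem.Chars.isdigit c = true
    · refine ⟨fun n p out => ?_, fun out => ?_⟩ <;>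
        simp [delNumsTok, delNumsALoop, hd, ih.1]
    · by_cases ha : PySem.Chars.isalpha c = true
      · refine ⟨fun n p out => ?_, fun out => ?_⟩ <;>
          simp only [delNumsTok, delNumsALoop, delNumsRender, hd, ha, if_false, if_true,
            Bool.false_eq_true] <;>
          split_ifs <;> first
            | exact ih.2 _
            | omega
      · refine ⟨fun n p out => ?_, fun out => ?_⟩ <;>
          simp [delNumsTok, delNumsALoop, delNumsRender, hd, ha, ih.2]

-- ===== VERDICT (by name: the statement is the Claim_ definition above) =====
theorem del_numbers_py_spec : Claim_equal_del_numbers_py := by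
  intro acronym _
  unfold Spec_del_numbers_py del_numbers_py del_numbers_py_alt
  rw [(delNums_key acronym.toList).2]
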